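-- pv_equiv track=rewrite | github.com/UlrichLudwig/bioinformatics_algorithms1_coursera_2013_ucsd | ch3/motifEnumeration.py | mutateByIndex
-- ===== SOURCE A (Python) =====
-- def generateKmerAll(k):
--     atcg = ['A','T','G','C']
--     output = []
--     while k>1:
--         for i in generateKmerAll(k-1):
--             for j in atcg:
--                 output.append(i+j)
--         return output
--     return atcg
--
-- def mutateByIndex(kmer,index):
--     '''
--     Input: kmer and 1 index
--     Output: All possible mutated kmer, happened in the index
--     '''
--     mutated_kmer = set([])
--     all_possible_value = generateKmerAll(len(index))
--     for val in all_possible_value: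
--         kmer_as_list = list(kmer)
--         for i,ind in enumerate(index):
--             kmer_as_list[ind] = val[i]
--         mutated_kmer.add(''.join(kmer_as_list))
--
--     return mutated_kmer
-- ===== SOURCE B (Python) =====
-- def mutateByIndex(kmer, index):
--     result = set()
--
--     def go(rest, chars):
--         if not rest:
--             result.add(''.join(chars))
--         else:
--             for b in 'ATGC':
--                 chars2 = list(chars)
--                 chars2[rest[0]] = b
--                 go(rest[1:], chars2)
--
--     go(index, list(kmer))
--     return result
-- ===== Notes on version B (the rewrite author's own statement) =====
-- stated objective: alternative
-- what changed: B drops the generateKmerAll precompute of all 4^len(index) value strings and instead enumerates the mutations by direct recursive backtracking over the index positions, writing each base into the working character list and recursing on the remaining indices.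
import Mathlib
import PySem

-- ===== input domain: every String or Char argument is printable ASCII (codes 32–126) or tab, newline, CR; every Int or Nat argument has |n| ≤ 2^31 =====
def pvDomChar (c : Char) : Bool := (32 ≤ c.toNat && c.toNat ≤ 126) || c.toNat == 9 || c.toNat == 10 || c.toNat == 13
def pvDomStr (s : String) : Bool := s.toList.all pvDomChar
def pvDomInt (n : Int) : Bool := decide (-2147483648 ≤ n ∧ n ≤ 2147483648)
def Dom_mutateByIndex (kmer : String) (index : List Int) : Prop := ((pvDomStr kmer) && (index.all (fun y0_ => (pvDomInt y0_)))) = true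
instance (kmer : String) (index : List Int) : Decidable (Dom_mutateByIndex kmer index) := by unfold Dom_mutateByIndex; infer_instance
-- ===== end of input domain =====

-- B replaces A's generateKmerAll precompute of all 4^m value strings by direct recursive
-- backtracking over the index positions (objective: alternative decomposition, same cost).

-- ===== PORT A =====
-- atcg = ['A','T','G','C']
def pvAtcg : List String := ["A", "T", "G", "C"]

-- generateKmerAll: the while k>1 loop runs at most once (its body ends in return), so it is
-- 'if k > 1 then <nested append loops> else atcg'; the nested appending for-loops over
-- generateKmerAll(k-1) and atcg are the foldl below.
def generateKmerAll (k : Int) : List String :=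
  if h : k > 1 then
    (generateKmerAll (k - 1)).foldl (fun out i => out ++ pvAtcg.map (fun j => i ++ j)) []
  else pvAtcg
termination_by k.toNat
decreasing_by omega

-- val[i] is always in range on inputs A accepts (generateKmerAll(len(index)) strings have
-- length ≥ len(index)), so the total pyGetD with an arbitrary default is exact there;
-- kmer_as_list[ind] = … is pySetD, exact under Pre_ (Raise.InRange).
def mutateByIndex (kmer : String) (index : List Int) : List String :=
  (generateKmerAll (index.length : Int)).foldl
    (fun (s : PySem.Set String) val =>
      let cl := (PySem.List.enumerate index 0).foldl
        (fun cl p => PySem.List.pySetD cl p.2 (PySem.List.pyGetD val.toList p.1 'A')) kmer.toList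
      PySem.Set.add s (String.mk cl))
    PySem.Set.empty

-- ===== PORT B =====
-- for b in 'ATGC'
def pvBases : List Char := ['A', 'T', 'G', 'C']

-- go(rest, chars): recursive backtracking; chars2 = list(chars); chars2[rest[0]] = b is the
-- functional pySetD (exact under Pre_), result-set accumulator threaded through.
def pvGo (rest : List Int) (chars : List Char) (result : PySem.Set String) : PySem.Set String :=
  match rest with
  | [] => PySem.Set.add result (String.mk chars)
  | i :: rest' =>
      pvBases.foldl (fun result b => pvGo rest' (PySem.List.pySetD chars i b) result) result

def mutateByIndex_alt (kmer : String) (index : List Int) : List String :=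
  pvGo index kmer.toList PySem.Set.empty

-- ===== PRECONDITION & SPEC =====
-- Pre_ excludes exactly the inputs where some index is out of range for kmer, on which
-- Python A (and B) raise IndexError.
def Pre_mutateByIndex (kmer : String) (index : List Int) : Prop :=
  ∀ i ∈ index, PySem.Raise.InRange kmer.toList.length i
instance (kmer : String) (index : List Int) : Decidable (Pre_mutateByIndex kmer index) := by
  unfold Pre_mutateByIndex; infer_instance

def pvWitness_mutateByIndex : String × List Int := ("ACGT", [0, 2])

def Spec_mutateByIndex (kmer : String) (index : List Int) (out : List String) : Prop := out = mutateByIndex_alt kmer index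
instance (kmer : String) (index : List Int) (out : List String) : Decidable (Spec_mutateByIndex kmer index out) := by unfold Spec_mutateByIndex; infer_instance

-- ===== CLAIM (what is proved, stated in full; the proofs are below) =====
def Claim_equal_mutateByIndex : Prop := ∀ (kmer : String) (index : List Int), Dom_mutateByIndex kmer index → Pre_mutateByIndex kmer index → Spec_mutateByIndex kmer index (mutateByIndex kmer index)

-- ===== LEMMAS AND PROOFS =====

-- all choice sequences of length n over pvBases, leftmost position most significant
def pvAll : Nat → List (List Char)
  | 0 => [[]]
  | n + 1 => pvBases.flatMap (fun c => (pvAll n).map (fun l => c :: l))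

theorem pvAll_snoc (n : Nat) :
    pvAll (n + 1) = (pvAll n).flatMap (fun l => pvBases.map (fun c => l ++ [c])) := by
  induction n with
  | zero => decide
  | succ n ih =>
      have h2 : pvAll (n + 1) = pvBases.flatMap (fun c => (pvAll n).map (fun l => c :: l)) := rfl
      show pvBases.flatMap (fun c => (pvAll (n + 1)).map (fun l => c :: l)) = _
      conv_lhs => rw [ih]
      conv_rhs => rw [h2]
      simp [List.flatMap_assoc, List.flatMap_map, List.map_flatMap, List.map_map, Function.comp_def]

theorem genAll_toList (n : Nat) (h : 1 ≤ n) :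
    (generateKmerAll (n : Int)).map String.toList = pvAll n := by
  induction n with
  | zero => omega
  | succ n ih =>
      by_cases hn : 1 ≤ n
      · have h2 : ((n + 1 : Nat) : Int) > 1 := by omega
        rw [generateKmerAll, dif_pos h2]
        have hc : ((n + 1 : Nat) : Int) - 1 = (n : Int) := by omega
        rw [hc, PySem.List.foldl_append_eq_flatMap, pvAll_snoc, ← ih hn]
        simp [List.map_flatMap, List.flatMap_map, pvAtcg, pvBases]
      · have hn0 : n = 0 := by omega
        subst hn0
        rw [generateKmerAll]
        norm_num
        decide

-- the enumerate-overlay of A equals the zip-overlay, for a value list long enough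
theorem overlay_enumerate (index : List Int) (cs : List Char) (k : Nat)
    (hlen : k + index.length ≤ cs.length) (cl : List Char) :
    (PySem.List.enumerate index (k : Int)).foldl
        (fun cl p => PySem.List.pySetD cl p.2 (PySem.List.pyGetD cs p.1 'A')) cl
      = (index.zip (cs.drop k)).foldl (fun cl p => PySem.List.pySetD cl p.1 p.2) cl := by
  induction index generalizing k cl with
  | nil => simp [PySem.List.enumerate_nil]
  | cons i rest ih =>
      have hk : k < cs.length := by simp at hlen; omega
      rw [PySem.List.enumerate_cons, List.drop_eq_getElem_cons hk]
      simp only [List.zip_cons_cons, List.foldl_cons]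
      have : ((k : Int) + 1) = ((k + 1 : Nat) : Int) := by push_cast; ring
      rw [PySem.List.pyGetD_natCast, this, ih (k + 1) (by simp at hlen ⊢; omega)]
      simp [List.getD_eq_getElem?_getD, hk]

-- B's backtracking equals the fold of the zip-overlay over all choice sequences
theorem pvGo_eq_fold (rest : List Int) (cl : List Char) (s : PySem.Set String) :
    pvGo rest cl s
      = (pvAll rest.length).foldl
          (fun s cs =>
            PySem.Set.add s
              (String.mk ((rest.zip cs).foldl (fun cl p => PySem.List.pySetD cl p.1 p.2) cl))) s := by
  induction rest generalizing cl s with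
  | nil => rfl
  | cons i rest ih =>
      show pvBases.foldl (fun result b => pvGo rest (PySem.List.pySetD cl i b) result) s = _
      rw [show (i :: rest).length = rest.length + 1 from rfl, pvAll]
      rw [List.foldl_flatMap]
      simp only [List.foldl_map, List.zip_cons_cons, List.foldl_cons]
      exact PySem.List.foldl_congr_mem _ _ _ _ (fun s' b _ => ih (PySem.List.pySetD cl i b) s')

-- every string produced by generateKmerAll n (n ≥ 1) has length n
theorem genAll_length (n : Nat) (h : 1 ≤ n) :
    ∀ v ∈ pvAll n, v.length = n := by
  induction n with
  | zero => omega
  | succ n ih =>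
      intro v hv
      simp only [pvAll, List.mem_flatMap, List.mem_map] at hv
      obtain ⟨c, _, l, hl, rfl⟩ := hv
      by_cases hn : 1 ≤ n
      · simp [ih hn l hl]
      · interval_cases n
        · simp [pvAll] at hl; subst hl; rfl

-- ===== VERDICT (by name: the statement is the Claim_ definition above) =====
theorem mutateByIndex_spec : Claim_equal_mutateByIndex := by
  intro kmer index hdom hpre
  show mutateByIndex kmer index = mutateByIndex_alt kmer index
  unfold mutateByIndex mutateByIndex_alt
  rw [pvGo_eq_fold]
  cases index with
  | nil =>
      show (generateKmerAll 0).foldl _ _ = _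
      rw [generateKmerAll]
      simp [pvAtcg, pvAll, PySem.List.enumerate_nil, PySem.Set.add_eq_ite]
  | cons i rest =>
      have hn : 1 ≤ (i :: rest).length := by simp
      rw [← genAll_toList (i :: rest).length hn, List.foldl_map]
      refine PySem.List.foldl_congr_mem _ _ _ _ (fun s' val hval => ?_)
      have hm : val.toList ∈ pvAll (i :: rest).length := by
        rw [← genAll_toList (i :: rest).length hn]
        exact List.mem_map_of_mem hval
      have hlen : val.toList.length = (i :: rest).length := genAll_length _ hn _ hm
      have h0 : (0 : Int) = ((0 : Nat) : Int) := rfl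
      rw [h0, overlay_enumerate (i :: rest) val.toList 0 (by omega)]
      simp
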